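-- pv_equiv track=rewrite | github.com/Bendi71/GeneralProgramming | NonogramSolver/generator.py | extract_clues
-- ===== SOURCE A (Python) =====
-- def extract_clues(line):
--     """
--     Extract clues from a single line (row or column) of the Nonogram grid.
--
--     :param line: List of integers (0s and 1s) representing a line in the Nonogram.
--     :return: List of integers representing the clues for the line.
--     """
--     clues = []
--     count = 0
--     for cell in line:
--         if cell == 1:
--             count += 1
--         elif count > 0:
--             clues.append(count)
--             count = 0
--     if count > 0:
--         clues.append(count)
--     return clues or [0]
-- ===== SOURCE B (Python) =====
-- def extract_clues(line):
--     """Boundary-detection: pad the 0/1 mask with zeros, find 0->1 and 1->0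
--     transition positions, and obtain each clue as end-start index arithmetic."""
--     padded = [0] + [1 if cell == 1 else 0 for cell in line] + [0]
--     starts = [i for i, pair in enumerate(zip(padded, padded[1:])) if pair == (0, 1)]
--     ends = [i for i, pair in enumerate(zip(padded, padded[1:])) if pair == (1, 0)]
--     clues = [e - s for s, e in zip(starts, ends)]
--     return clues or [0]
-- ===== Notes on version B (the rewrite author's own statement) =====
-- stated objective: alternative
-- what changed: Replaced the running-counter-with-flush scan by boundary detection: pad the 0/1 mask with zeros, collect the positions of 0->1 and 1->0 transitions in two staged passes over adjacent pairs, and compute each clue as the difference of matching end and start positions; no run counter is ever maintained.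
import Mathlib
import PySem

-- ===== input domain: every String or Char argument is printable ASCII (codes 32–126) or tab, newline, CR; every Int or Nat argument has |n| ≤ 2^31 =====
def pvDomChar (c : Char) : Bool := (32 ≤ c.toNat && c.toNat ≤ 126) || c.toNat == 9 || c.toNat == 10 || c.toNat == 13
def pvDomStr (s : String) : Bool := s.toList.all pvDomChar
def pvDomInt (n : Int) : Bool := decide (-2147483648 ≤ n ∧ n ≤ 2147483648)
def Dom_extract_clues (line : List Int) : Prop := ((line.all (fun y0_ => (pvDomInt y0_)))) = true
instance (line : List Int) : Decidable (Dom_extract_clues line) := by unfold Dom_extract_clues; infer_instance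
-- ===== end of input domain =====

-- B replaces A's running-counter-with-flush scan by boundary detection: pad the 0/1
-- mask with zeros, collect 0->1 / 1->0 transition positions, clue = end - start.


-- ===== PORT A =====
-- A's for-loop over the cells, carrying (clues, count)
def pvLoopA : List Int → List Int → Int → List Int × Int
  | [], clues, count => (clues, count)
  | cell :: rest, clues, count =>
    if cell = 1 then pvLoopA rest clues (count + 1)
    else if count > 0 then pvLoopA rest (clues ++ [count]) 0
    else pvLoopA rest clues count

-- the trailing 'if count > 0: clues.append(count)' flush
def pvFlush (p : List Int × Int) : List Int :=
  if p.2 > 0 then p.1 ++ [p.2] else p.1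

-- 'return clues or [0]' (both Pythons end with this line verbatim)
def pvOrZero (clues : List Int) : List Int :=
  if clues = [] then [0] else clues

def extract_clues (line : List Int) : List Int :=
  pvOrZero (pvFlush (pvLoopA line [] 0))

-- ===== PORT B =====
-- '1 if cell == 1 else 0'
def pvBit (cell : Int) : Int := if cell = 1 then 1 else 0

def extract_clues_alt (line : List Int) : List Int :=
  let padded := 0 :: (line.map pvBit ++ [0])
  let pairs := padded.zip padded.tail
  let starts := ((PySem.List.enumerate pairs 0).filter
      (fun p => p.2 == ((0 : Int), (1 : Int)))).map (fun p => p.1)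
  let ends := ((PySem.List.enumerate pairs 0).filter
      (fun p => p.2 == ((1 : Int), (0 : Int)))).map (fun p => p.1)
  let clues := (starts.zip ends).map (fun p => p.2 - p.1)
  pvOrZero clues

-- ===== PRECONDITION & SPEC =====
def Spec_extract_clues (line : List Int) (out : List Int) : Prop := out = extract_clues_alt line
instance (line : List Int) (out : List Int) : Decidable (Spec_extract_clues line out) := by unfold Spec_extract_clues; infer_instance

-- ===== CLAIM (what is proved, stated in full; the proofs are below) =====
def Claim_equal_extract_clues : Prop := ∀ (line : List Int), Dom_extract_clues line → Spec_extract_clues line (extract_clues line)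

-- ===== LEMMAS AND PROOFS =====

-- reference clue list: pending run of 1s of length n, then the rest of the line
def pvClueList : List Int → Int → List Int
  | [], n => if n > 0 then [n] else []
  | x :: xs, n =>
    if x = 1 then pvClueList xs (n + 1)
    else (if n > 0 then [n] else []) ++ pvClueList xs 0

theorem pvLoopA_clueList : ∀ (xs : List Int) (clues : List Int) (count : Int), 0 ≤ count →
    pvFlush (pvLoopA xs clues count) = clues ++ pvClueList xs count := by
  intro xs
  induction xs with
  | nil => intro clues count _; simp only [pvLoopA, pvFlush, pvClueList]; split <;> simp
  | cons x xs ih =>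
    intro clues count hcount
    by_cases hx : x = 1
    · rw [show pvLoopA (x :: xs) clues count = pvLoopA xs clues (count + 1) by
        simp [pvLoopA, hx]]
      rw [show pvClueList (x :: xs) count = pvClueList xs (count + 1) by
        simp [pvClueList, hx]]
      exact ih clues (count + 1) (by omega)
    · by_cases hc : count > 0
      · rw [show pvLoopA (x :: xs) clues count = pvLoopA xs (clues ++ [count]) 0 by
          simp [pvLoopA, hx, hc]]
        rw [ih (clues ++ [count]) 0 (by omega)]
        simp [pvClueList, hx, hc]
      · rw [show pvLoopA (x :: xs) clues count = pvLoopA xs clues count by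
          simp [pvLoopA, hx, hc]]
        have hz : count = 0 := by omega
        subst hz
        rw [ih clues 0 (by omega)]
        simp [pvClueList, hx]

-- (starts, ends) of the adjacent-pair scan: state = previous bit, current pair index
def pvSE : Int → Int → List Int → List Int × List Int
  | _, _, [] => ([], [])
  | prev, i, x :: xs =>
    let r := pvSE x (i + 1) xs
    ((if prev = 0 ∧ x = 1 then i :: r.1 else r.1),
     (if prev = 1 ∧ x = 0 then i :: r.2 else r.2))

-- B's enumerate-zip-filter comprehensions compute pvSE
theorem pvSE_starts : ∀ (l : List Int) (prev i : Int),
    (((PySem.List.enumerate ((prev :: l).zip l) i).filter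
        (fun p => p.2 == ((0 : Int), (1 : Int)))).map (fun p => p.1)) = (pvSE prev i l).1 := by
  intro l
  induction l with
  | nil => intro prev i; simp [pvSE]
  | cons x xs ih =>
    intro prev i
    rw [show (prev :: x :: xs).zip (x :: xs) = (prev, x) :: (x :: xs).zip xs from rfl]
    rw [PySem.List.enumerate_cons, List.filter_cons]
    by_cases h : prev = 0 ∧ x = 1
    · simp only [pvSE, ← ih x (i + 1)]
      simp [h.1, h.2]
    · have hb : ((prev, x) == ((0 : Int), (1 : Int))) = false := by
        rcases Decidable.not_and_iff_or_not.mp h with h' | h' <;> simp [Prod.ext_iff, h']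
      simp only [pvSE, ← ih x (i + 1)]
      simp [hb, h]

theorem pvSE_ends : ∀ (l : List Int) (prev i : Int),
    (((PySem.List.enumerate ((prev :: l).zip l) i).filter
        (fun p => p.2 == ((1 : Int), (0 : Int)))).map (fun p => p.1)) = (pvSE prev i l).2 := by
  intro l
  induction l with
  | nil => intro prev i; simp [pvSE]
  | cons x xs ih =>
    intro prev i
    rw [show (prev :: x :: xs).zip (x :: xs) = (prev, x) :: (x :: xs).zip xs from rfl]
    rw [PySem.List.enumerate_cons, List.filter_cons]
    by_cases h : prev = 1 ∧ x = 0
    · simp only [pvSE, ← ih x (i + 1)]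
      simp [h.1, h.2]
    · have hb : ((prev, x) == ((1 : Int), (0 : Int))) = false := by
        rcases Decidable.not_and_iff_or_not.mp h with h' | h' <;> simp [Prod.ext_iff, h']
      simp only [pvSE, ← ih x (i + 1)]
      simp [hb, h]

-- matching start/end positions differ by exactly the run length
theorem pvSE_clueList : ∀ (line : List Int) (i sp : Int),
    ((let r := pvSE 0 i (line.map pvBit ++ [0]);
      (r.1.zip r.2).map (fun p => p.2 - p.1)) = pvClueList line 0)
    ∧ (i - sp > 0 →
      (let r := pvSE 1 i (line.map pvBit ++ [0]);
       ((sp :: r.1).zip r.2).map (fun p => p.2 - p.1)) = pvClueList line (i - sp)) := by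
  intro line
  induction line with
  | nil =>
    intro i sp
    refine ⟨by simp [pvSE, pvClueList], fun h => ?_⟩
    have hlt : sp < i := by omega
    simp [pvSE, pvClueList, hlt]
  | cons x xs ih =>
    intro i sp
    by_cases hx : x = 1
    · constructor
      · show ((pvSE 0 i (pvBit x :: (xs.map pvBit ++ [0]))).1.zip
            (pvSE 0 i (pvBit x :: (xs.map pvBit ++ [0]))).2).map (fun p => p.2 - p.1)
          = pvClueList (x :: xs) 0
        rw [show pvBit x = 1 by simp [pvBit, hx]]
        have h1 := (ih (i + 1) i).2 (by omega)
        simp only [show i + 1 - i = 1 by omega] at h1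
        rw [show pvClueList (x :: xs) 0 = pvClueList xs 1 by simp [pvClueList, hx]]
        simpa [pvSE] using h1
      · intro hsp
        show ((sp :: (pvSE 1 i (pvBit x :: (xs.map pvBit ++ [0]))).1).zip
            (pvSE 1 i (pvBit x :: (xs.map pvBit ++ [0]))).2).map (fun p => p.2 - p.1)
          = pvClueList (x :: xs) (i - sp)
        rw [show pvBit x = 1 by simp [pvBit, hx]]
        have h1 := (ih (i + 1) sp).2 (by omega)
        rw [show pvClueList (x :: xs) (i - sp) = pvClueList xs (i + 1 - sp) by
          rw [show i + 1 - sp = (i - sp) + 1 by omega]; simp [pvClueList, hx]]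
        simpa [pvSE] using h1
    · constructor
      · show ((pvSE 0 i (pvBit x :: (xs.map pvBit ++ [0]))).1.zip
            (pvSE 0 i (pvBit x :: (xs.map pvBit ++ [0]))).2).map (fun p => p.2 - p.1)
          = pvClueList (x :: xs) 0
        rw [show pvBit x = 0 by simp [pvBit, hx]]
        have h0 := (ih (i + 1) sp).1
        rw [show pvClueList (x :: xs) 0 = pvClueList xs 0 by simp [pvClueList, hx]]
        simpa [pvSE] using h0
      · intro hsp
        show ((sp :: (pvSE 1 i (pvBit x :: (xs.map pvBit ++ [0]))).1).zip
            (pvSE 1 i (pvBit x :: (xs.map pvBit ++ [0]))).2).map (fun p => p.2 - p.1)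
          = pvClueList (x :: xs) (i - sp)
        rw [show pvBit x = 0 by simp [pvBit, hx]]
        have h0 := (ih (i + 1) sp).1
        have hlt : sp < i := by omega
        rw [show pvClueList (x :: xs) (i - sp) = (i - sp) :: pvClueList xs 0 by
          simp [pvClueList, hx, hlt]]
        simpa [pvSE] using h0

-- ===== VERDICT (by name: the statement is the Claim_ definition above) =====
theorem extract_clues_spec : Claim_equal_extract_clues := by
  intro line _
  unfold Spec_extract_clues extract_clues extract_clues_alt
  rw [pvLoopA_clueList line [] 0 (by omega)]
  simp only [List.nil_append, List.tail_cons]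
  rw [pvSE_starts (line.map pvBit ++ [0]) 0 0, pvSE_ends (line.map pvBit ++ [0]) 0 0]
  rw [(pvSE_clueList line 0 0).1]
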